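-- pv_equiv track=rewrite | github.com/CFM-MSG/Code_JSG | method_prvr/eval.py | get_gt_old
-- ===== SOURCE A (Python) =====
-- def get_gt_old(video_metas, query_metas):
--     v2t_gt = []
--     for vid_id in video_metas:
--         v2t_gt.append([])
--         for i, query_id in enumerate(query_metas):
--             if query_id.split('#', 1)[0] == vid_id:
--                 v2t_gt[-1].append(i)
--
--     t2v_gt = {}
--     for i, t_gts in enumerate(v2t_gt):
--         for t_gt in t_gts:
--             t2v_gt.setdefault(t_gt, [])
--             t2v_gt[t_gt].append(i)
--
--     return v2t_gt, t2v_gt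
-- ===== SOURCE B (Python) =====
-- def get_gt_old(video_metas, query_metas):
--     q_by_prefix = {}
--     for i, q in enumerate(query_metas):
--         q_by_prefix.setdefault(q.split('#', 1)[0], []).append(i)
--     pos_by_vid = {}
--     for p, vid in enumerate(video_metas):
--         pos_by_vid.setdefault(vid, []).append(p)
--     v2t_gt = [q_by_prefix.get(vid, []) for vid in video_metas]
--     t2v_gt = {i: ps for vid, ps in pos_by_vid.items()
--               for i in q_by_prefix.get(vid, [])}
--     return v2t_gt, t2v_gt
-- ===== Notes on version B (the rewrite author's own statement) =====
-- stated objective: faster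
-- what changed: A's O(V*Q) nested video-by-query scans plus a dict-inversion pass are replaced by two hash indexes (query indices grouped by prefix, positions grouped by video id) built in one pass each, from which v2t_gt is read off by lookup and t2v_gt by a single comprehension over the position index.
import Mathlib
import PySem

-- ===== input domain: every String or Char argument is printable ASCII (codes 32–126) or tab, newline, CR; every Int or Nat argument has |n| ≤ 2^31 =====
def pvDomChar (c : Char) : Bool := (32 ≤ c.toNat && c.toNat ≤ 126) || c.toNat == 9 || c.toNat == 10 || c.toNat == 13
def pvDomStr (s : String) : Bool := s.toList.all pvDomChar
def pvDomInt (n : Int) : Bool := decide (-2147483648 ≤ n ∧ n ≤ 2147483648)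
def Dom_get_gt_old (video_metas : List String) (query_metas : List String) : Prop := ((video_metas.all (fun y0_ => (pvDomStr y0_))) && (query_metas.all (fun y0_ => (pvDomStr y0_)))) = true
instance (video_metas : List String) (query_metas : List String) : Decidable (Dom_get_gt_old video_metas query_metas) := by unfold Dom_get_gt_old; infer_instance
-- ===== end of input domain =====

-- B replaces A's nested video×query scans and dict inversion by two hash indexes
-- (query indices by prefix, positions by video id) built in one pass each.

-- ===== PORT A =====
-- q.split('#', 1)[0]: the separator is nonempty, so split never raises and returns a
-- nonempty list whose element 0 is its head (exact).
def pvPrefix (q : String) : String := ((PySem.Str.splitMax? q "#" 1).getD []).headD ""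

def get_gt_old (video_metas : List String) (query_metas : List String) : List (List Int) × (List (Int × List Int)) :=
  -- outer loop appends one fresh list per video; the inner loop appends to v2t_gt[-1],
  -- i.e. builds exactly that last list
  let v2t_gt : List (List Int) := video_metas.foldl (fun v2t vid_id =>
      v2t ++ [(PySem.List.enumerate query_metas).foldl
        (fun cur iq => if pvPrefix iq.2 == vid_id then cur ++ [iq.1] else cur) []]) []
  -- t2v_gt.setdefault(t_gt, []) followed by t2v_gt[t_gt].append(i)
  let t2v_gt : PySem.Dict Int (List Int) := (PySem.List.enumerate v2t_gt).foldl (fun d it =>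
      it.2.foldl (fun d t_gt => (d.setdefault t_gt []).modify t_gt [] (· ++ [it.1])) d)
    PySem.Dict.empty
  (v2t_gt, t2v_gt.items)

-- ===== PORT B =====
-- d.setdefault(k, []).append(x) is ported as Dict.modify: d[k] = d.get(k, []) + [x] (exact)
def get_gt_old_alt (video_metas : List String) (query_metas : List String) : List (List Int) × (List (Int × List Int)) :=
  let q_by_prefix : PySem.Dict String (List Int) := (PySem.List.enumerate query_metas).foldl
      (fun d iq => d.modify (pvPrefix iq.2) [] (· ++ [iq.1])) PySem.Dict.empty
  let pos_by_vid : PySem.Dict String (List Int) := (PySem.List.enumerate video_metas).foldl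
      (fun d pv => d.modify pv.2 [] (· ++ [pv.1])) PySem.Dict.empty
  let v2t_gt : List (List Int) := video_metas.map (fun vid => q_by_prefix.getD vid [])
  let t2v_gt : PySem.Dict Int (List Int) := pos_by_vid.items.foldl (fun d vp =>
      (q_by_prefix.getD vp.1 []).foldl (fun d i => d.insert i vp.2) d) PySem.Dict.empty
  (v2t_gt, t2v_gt.items)

-- ===== PRECONDITION & SPEC =====
def Spec_get_gt_old (video_metas : List String) (query_metas : List String) (out : List (List Int) × (List (Int × List Int))) : Prop := out = get_gt_old_alt video_metas query_metas
instance (video_metas : List String) (query_metas : List String) (out : List (List Int) × (List (Int × List Int))) : Decidable (Spec_get_gt_old video_metas query_metas out) := by unfold Spec_get_gt_old; infer_instance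

-- ===== CLAIM (what is proved, stated in full; the proofs are below) =====
def Claim_equal_get_gt_old : Prop := ∀ (video_metas : List String) (query_metas : List String), Dom_get_gt_old video_metas query_metas → Spec_get_gt_old video_metas query_metas (get_gt_old video_metas query_metas)

-- ===== LEMMAS AND PROOFS =====

-- query indices whose prefix is vid, ascending
def pvQ (query_metas : List String) (vid : String) : List Int :=
  ((PySem.List.enumerate query_metas).filter (fun iq => pvPrefix iq.2 == vid)).map (fun iq => iq.1)
-- positions of vid in video_metas, ascending
def pvP (video_metas : List String) (vid : String) : List Int :=
  ((PySem.List.enumerate video_metas).filter (fun pv => pv.2 == vid)).map (fun pv => pv.1)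
-- the common value of both t2v_gt item lists
def pvLB (video_metas query_metas : List String) : List (Int × List Int) :=
  (PySem.List.dedup video_metas).flatMap
    (fun vid => (pvQ query_metas vid).map (fun i => (i, pvP video_metas vid)))

-- enumerate basics
theorem pvEnum_map {α β : Type} (f : α → β) (l : List α) (s : Int) :
    PySem.List.enumerate (l.map f) s = (PySem.List.enumerate l s).map (fun p => (p.1, f p.2)) := by
  induction l generalizing s with
  | nil => simp [PySem.List.enumerate]
  | cons x t ih => simp [PySem.List.enumerate, ih]

theorem pvEnum_snd {α : Type} (l : List α) (s : Int) :
    (PySem.List.enumerate l s).map (fun p => p.2) = l := by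
  induction l generalizing s with
  | nil => simp [PySem.List.enumerate]
  | cons x t ih => simp [PySem.List.enumerate, ih]

theorem pvEnum_fst_ge {α : Type} (l : List α) (s : Int) :
    ∀ p ∈ PySem.List.enumerate l s, s ≤ p.1 := by
  induction l generalizing s with
  | nil => simp [PySem.List.enumerate]
  | cons x t ih =>
    intro p hp
    simp only [PySem.List.enumerate, List.mem_cons] at hp
    rcases hp with h | h
    · subst h; simp
    · have := ih (s + 1) p h; omega

theorem pvEnum_fst_nodup {α : Type} (l : List α) (s : Int) :
    ((PySem.List.enumerate l s).map (fun p => p.1)).Nodup := by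
  induction l generalizing s with
  | nil => simp [PySem.List.enumerate]
  | cons x t ih =>
    simp only [PySem.List.enumerate, List.map_cons, List.nodup_cons]
    refine ⟨?_, ih (s + 1)⟩
    intro hmem
    obtain ⟨p, hp, hfst⟩ := List.mem_map.1 hmem
    have := pvEnum_fst_ge t (s + 1) p hp
    omega

theorem pvEnum_mem_eq {α : Type} (l : List α) (s : Int) {i : Int} {q q' : α}
    (h : (i, q) ∈ PySem.List.enumerate l s) (h' : (i, q') ∈ PySem.List.enumerate l s) : q = q' := by
  induction l generalizing s with
  | nil => simp [PySem.List.enumerate] at h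
  | cons x t ih =>
    simp only [PySem.List.enumerate, List.mem_cons, Prod.mk.injEq] at h h'
    rcases h with ⟨hi, hq⟩ | h <;> rcases h' with ⟨hi', hq'⟩ | h'
    · rw [hq, hq']
    · exact absurd (pvEnum_fst_ge t (s + 1) _ h') (by simp; omega)
    · exact absurd (pvEnum_fst_ge t (s + 1) _ h) (by simp; omega)
    · exact ih (s + 1) h h'

-- pvQ facts
theorem pvQ_nodup (qs : List String) (vid : String) : (pvQ qs vid).Nodup := by
  unfold pvQ
  exact (List.filter_sublist.map _).nodup (pvEnum_fst_nodup qs 0)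

theorem pvQ_disjoint (qs : List String) {v w : String} {i : Int}
    (hv : i ∈ pvQ qs v) (hw : i ∈ pvQ qs w) : v = w := by
  simp only [pvQ, List.mem_map, List.mem_filter] at hv hw
  obtain ⟨⟨i1, q1⟩, ⟨hm1, hp1⟩, hf1⟩ := hv
  obtain ⟨⟨i2, q2⟩, ⟨hm2, hp2⟩, hf2⟩ := hw
  simp only at hf1 hf2 hp1 hp2
  subst hf1
  rw [show i2 = i1 from hf2] at hm2
  have hq : q1 = q2 := pvEnum_mem_eq qs 0 hm1 hm2
  rw [beq_iff_eq] at hp1 hp2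
  rw [← hp1, ← hp2, hq]

-- Python's d.setdefault(k, v0) followed by d[k] = f(d[k]) is d[k] = f(d.get(k, v0))
theorem pvSetdefault_modify {κ ν : Type} [BEq κ] [LawfulBEq κ]
    (d : PySem.Dict κ ν) (k : κ) (v0 : ν) (f : ν → ν) :
    (d.setdefault k v0).modify k v0 f = d.modify k v0 f := by
  by_cases h : d.contains k = true
  · rw [PySem.Dict.setdefault_of_contains d v0 h]
  · have h' : d.contains k = false := by simpa using h
    rw [PySem.Dict.setdefault_of_not_contains d v0 h']
    have hg : (d.insert k v0).getD k v0 = v0 := by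
      rw [PySem.Dict.getD_insert_self]
    simp only [PySem.Dict.modify, hg]
    rw [PySem.Dict.insert_insert_self, PySem.Dict.getD_of_not_contains d v0 h']

-- PySem.Set.update basics
theorem pvUpdate_append {α : Type} [BEq α] (s : PySem.Set α) (xs ys : List α) :
    PySem.Set.update s (xs ++ ys) = PySem.Set.update (PySem.Set.update s xs) ys := by
  simp [PySem.Set.update, List.foldl_append]

theorem pvUpdate_of_subset {α : Type} [BEq α] [LawfulBEq α] :
    ∀ (xs : List α) (s : PySem.Set α), (∀ x ∈ xs, x ∈ s) → PySem.Set.update s xs = s := by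
  intro xs
  induction xs with
  | nil => intro s _; rfl
  | cons x t ih =>
    intro s h
    have hx : PySem.Set.add s x = s := by
      have : x ∈ s := h x (by simp)
      simp [PySem.Set.add, this]
    show PySem.Set.update (PySem.Set.add s x) t = s
    rw [hx]
    exact ih s (fun y hy => h y (by simp [hy]))

theorem pvUpdate_of_fresh {α : Type} [BEq α] [LawfulBEq α] :
    ∀ (xs : List α) (s : PySem.Set α), xs.Nodup → (∀ x ∈ xs, x ∉ s) →
    PySem.Set.update s xs = s ++ xs := by
  intro xs
  induction xs with
  | nil => intro s _ _; simp
  | cons x t ih =>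
    intro s hnd h
    obtain ⟨hx1, hx2⟩ := List.nodup_cons.1 hnd
    have hx : PySem.Set.add s x = s ++ [x] := by
      have : x ∉ s := h x (by simp)
      simp [PySem.Set.add, this]
    show PySem.Set.update (PySem.Set.add s x) t = s ++ x :: t
    rw [hx, ih (s ++ [x]) hx2 ?fresh]
    · simp
    case fresh =>
      intro y hy hmem
      rcases List.mem_append.1 hmem with hs' | hx'
      · exact h y (by simp [hy]) hs'
      · simp only [List.mem_singleton] at hx'
        exact hx1 (hx' ▸ hy)

-- dedup of a flatMap with nodup, pairwise-disjoint blocks is the flatMap over dedup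
theorem pvUpdate_flatMap {α β : Type} [BEq α] [LawfulBEq α] [BEq β] [LawfulBEq β] (f : α → List β)
    (hnd : ∀ v, (f v).Nodup) (hdisj : ∀ v w i, i ∈ f v → i ∈ f w → v = w) :
    ∀ (l seen : List α), seen.Nodup →
    PySem.Set.update (seen.flatMap f) (l.flatMap f) = (PySem.Set.update seen l).flatMap f := by
  intro l
  induction l with
  | nil => intro seen _; rfl
  | cons v t ih =>
    intro seen hseen
    rw [List.flatMap_cons, pvUpdate_append]
    by_cases hv : v ∈ seen
    · rw [pvUpdate_of_subset _ _ (fun i hi => List.mem_flatMap.2 ⟨v, hv, hi⟩)]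
      rw [ih seen hseen]
      have hadd : PySem.Set.add seen v = seen := by simp [PySem.Set.add, hv]
      show _ = (PySem.Set.update (PySem.Set.add seen v) t).flatMap f
      rw [hadd]
    · have hfresh : ∀ i ∈ f v, i ∉ seen.flatMap f := by
        intro i hi hmem
        obtain ⟨w, hw, hiw⟩ := List.mem_flatMap.1 hmem
        exact hv ((hdisj v w i hi hiw) ▸ hw)
      rw [pvUpdate_of_fresh _ _ (hnd v) hfresh]
      have happ : seen.flatMap f ++ f v = (seen ++ [v]).flatMap f := by simp
      have hseennodup : (seen ++ [v]).Nodup := by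
        simp [List.nodup_append, hseen]
        intro b hb hbv
        exact hv (hbv ▸ hb)
      rw [happ, ih (seen ++ [v]) hseennodup]
      have hadd : PySem.Set.add seen v = seen ++ [v] := by simp [PySem.Set.add, hv]
      show _ = (PySem.Set.update (PySem.Set.add seen v) t).flatMap f
      rw [hadd]

theorem pvNodup_flatMap {α β : Type} (f : α → List β)
    (hnd : ∀ v, (f v).Nodup) (hdisj : ∀ v w i, i ∈ f v → i ∈ f w → v = w) :
    ∀ l : List α, l.Nodup → (l.flatMap f).Nodup := by
  intro l
  induction l with
  | nil => simp
  | cons v t ih =>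
    intro h
    obtain ⟨hv, ht⟩ := List.nodup_cons.1 h
    rw [List.flatMap_cons, List.nodup_append]
    refine ⟨hnd v, ih ht, ?_⟩
    intro a ha b hb hab
    obtain ⟨w, hw, hbw⟩ := List.mem_flatMap.1 hb
    exact hv ((hdisj v w a ha (hab ▸ hbw)) ▸ hw)

-- keyed grouping loop: getD of a modify-append fold
theorem pvGetD_modify_key {κ ν β : Type} [BEq κ] [LawfulBEq κ] [DecidableEq κ]
    (key : β → κ) (val : β → ν) :
    ∀ (l : List β) (d : PySem.Dict κ (List ν)) (c : κ),
    (l.foldl (fun d x => d.modify (key x) [] (· ++ [val x])) d).getD c []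
      = d.getD c [] ++ (l.filter (fun x => key x == c)).map val := by
  intro l
  induction l with
  | nil => intro d c; simp
  | cons x t ih =>
    intro d c
    rw [List.foldl_cons, ih, List.filter_cons]
    by_cases h : key x = c
    · subst h
      simp [PySem.Dict.getD_modify_self, List.append_assoc]
    · have hne : c ≠ key x := fun e => h e.symm
      rw [PySem.Dict.getD_modify_of_ne _ _ _ hne]
      simp [h]

-- identity-keyed version (inner loop of A's second phase)
theorem pvGetD_modify_id {κ ν : Type} [BEq κ] [LawfulBEq κ] [DecidableEq κ] (y : ν) :
    ∀ (l : List κ) (d : PySem.Dict κ (List ν)) (c : κ),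
    (l.foldl (fun d i => d.modify i [] (· ++ [y])) d).getD c []
      = d.getD c [] ++ (l.filter (fun i => i == c)).map (fun _ => y) := by
  intro l
  induction l with
  | nil => intro d c; simp
  | cons x t ih =>
    intro d c
    rw [List.foldl_cons, ih, List.filter_cons]
    by_cases h : x = c
    · subst h
      simp [PySem.Dict.getD_modify_self, List.append_assoc]
    · have hne : c ≠ x := fun e => h e.symm
      rw [PySem.Dict.getD_modify_of_ne _ _ _ hne]
      simp [h]

-- keys of a modify fold, keyed/identity versions
theorem pvKeys_modify_add {κ ν : Type} [BEq κ] [LawfulBEq κ]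
    (d : PySem.Dict κ ν) (k : κ) (d0 : ν) (f : ν → ν) :
    (d.modify k d0 f).keys = PySem.Set.add d.keys k := by
  rw [PySem.Dict.keys_modify]
  by_cases h : d.contains k = true
  · rw [PySem.Dict.keys_insert_of_contains _ _ h]
    have : k ∈ d.keys := (PySem.Dict.contains_iff_mem_keys d k).1 h
    simp [PySem.Set.add, this]
  · have h' : d.contains k = false := by simpa using h
    rw [PySem.Dict.keys_insert_of_not_contains _ _ h']
    have : k ∉ d.keys := fun hm => by
      rw [(PySem.Dict.contains_iff_mem_keys d k).2 hm] at h'; cases h'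
    simp [PySem.Set.add, this]

theorem pvKeys_modify_key {κ ν β : Type} [BEq κ] [LawfulBEq κ]
    (key : β → κ) (val : β → ν → ν) (d0 : ν) :
    ∀ (l : List β) (d : PySem.Dict κ ν),
    (l.foldl (fun d x => d.modify (key x) d0 (val x)) d).keys
      = PySem.Set.update d.keys (l.map key) := by
  intro l
  induction l with
  | nil => intro d; rfl
  | cons x t ih =>
    intro d
    rw [List.foldl_cons, ih, List.map_cons]
    show _ = PySem.Set.update (PySem.Set.add d.keys (key x)) (t.map key)
    rw [pvKeys_modify_add]

theorem pvKeys_modify_id {κ ν : Type} [BEq κ] [LawfulBEq κ] (y : List ν → List ν) :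
    ∀ (l : List κ) (d : PySem.Dict κ (List ν)),
    (l.foldl (fun d i => d.modify i [] y) d).keys = PySem.Set.update d.keys l := by
  intro l
  induction l with
  | nil => intro d; rfl
  | cons x t ih =>
    intro d
    rw [List.foldl_cons, ih]
    show _ = PySem.Set.update (PySem.Set.add d.keys x) t
    rw [pvKeys_modify_add]

-- items of a fresh-keyed insert fold (identity key)
theorem pvItems_insert_fresh_id {κ ν : Type} [BEq κ] [LawfulBEq κ] :
    ∀ (l : List κ) (v : ν) (d : PySem.Dict κ ν), l.Nodup → (∀ i ∈ l, d.contains i = false) →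
    (l.foldl (fun d i => d.insert i v) d).items = d.items ++ l.map (fun i => (i, v)) := by
  intro l
  induction l with
  | nil => intro v d _ _; simp
  | cons x t ih =>
    intro v d hnd hf
    obtain ⟨hx, ht⟩ := List.nodup_cons.1 hnd
    have hx0 : d.contains x = false := hf x (by simp)
    have hitems : (d.insert x v).items = d.items ++ [(x, v)] :=
      PySem.Dict.items_insert_of_not_contains d v hx0
    rw [List.foldl_cons, ih v _ ht ?fr, hitems]
    · simp
    case fr =>
      intro i hi
      rw [PySem.Dict.contains_insert]
      have h1 : (i == x) = false := by
        simp; intro e; exact hx (e ▸ hi)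
      rw [h1, hf i (by simp [hi])]
      rfl

-- B's t2v loop: nested insert over pairwise-disjoint fresh key blocks appends all pairs
theorem pvItems_nested_insert {κ ν α : Type} [BEq κ] [LawfulBEq κ]
    (g : α → List κ) (w : α → ν)
    (hnd : ∀ a, (g a).Nodup) (hdisj : ∀ a b i, i ∈ g a → i ∈ g b → a = b) :
    ∀ (l : List α) (d : PySem.Dict κ ν), l.Nodup → (∀ a ∈ l, ∀ i ∈ g a, d.contains i = false) →
    (l.foldl (fun d a => (g a).foldl (fun d i => d.insert i (w a)) d) d).items
      = d.items ++ l.flatMap (fun a => (g a).map (fun i => (i, w a))) := by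
  intro l
  induction l with
  | nil => intro d _ _; simp
  | cons a t ih =>
    intro d hnd2 hfresh
    obtain ⟨ha, ht⟩ := List.nodup_cons.1 hnd2
    have hin : ((g a).foldl (fun d i => d.insert i (w a)) d).items
        = d.items ++ (g a).map (fun i => (i, w a)) :=
      pvItems_insert_fresh_id (g a) (w a) d (hnd a) (fun i hi => hfresh a (by simp) i hi)
    have hcont : ∀ b ∈ t, ∀ i ∈ g b,
        ((g a).foldl (fun d i => d.insert i (w a)) d).contains i = false := by
      intro b hb i hi
      show (((g a).foldl (fun d i => d.insert i (w a)) d).items.any (fun p => p.1 == i)) = false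
      rw [hin, List.any_append]
      have h1 : d.items.any (fun p => p.1 == i) = false := hfresh b (by simp [hb]) i hi
      have h2 : (((g a).map (fun i => (i, w a))).any (fun p => p.1 == i)) = false := by
        rw [List.any_eq_false]
        intro p hp
        obtain ⟨j, hj, hpe⟩ := List.mem_map.1 hp
        subst hpe
        simp only [beq_iff_eq]
        intro e
        have hji : j = i := e
        exact ha ((hdisj a b i (hji ▸ hj) hi) ▸ hb)
      rw [h1, h2]
      rfl
    rw [List.foldl_cons, ih _ ht hcont, hin, List.flatMap_cons, List.append_assoc]

-- turn a filter+map into the fold carried out by A's inner v2t loop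
theorem pvA_v2t (vs qs : List String) :
    vs.foldl (fun v2t vid_id =>
      v2t ++ [(PySem.List.enumerate qs).foldl
        (fun cur iq => if pvPrefix iq.2 == vid_id then cur ++ [iq.1] else cur) []]) []
    = vs.map (pvQ qs) := by
  rw [PySem.List.foldl_append_singleton_eq_map]
  simp only [List.nil_append]
  refine List.map_congr_left (fun vid _ => ?_)
  rw [PySem.List.foldl_append_if]
  simp [pvQ]

-- B's q_by_prefix / pos_by_vid lookups
theorem pvQbp_getD (qs : List String) (vid : String) :
    ((PySem.List.enumerate qs).foldl
      (fun d iq => d.modify (pvPrefix iq.2) [] (· ++ [iq.1])) PySem.Dict.empty).getD vid []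
      = pvQ qs vid := by
  rw [pvGetD_modify_key (fun iq : Int × String => pvPrefix iq.2) (fun iq => iq.1)]
  simp [pvQ]

theorem pvPbv_getD (vs : List String) (vid : String) :
    ((PySem.List.enumerate vs).foldl
      (fun d pv => d.modify pv.2 [] (· ++ [pv.1])) PySem.Dict.empty).getD vid []
      = pvP vs vid := by
  rw [pvGetD_modify_key (fun pv : Int × String => pv.2) (fun pv => pv.1)]
  simp [pvP]

theorem pvDedup_nodup (vs : List String) : (PySem.List.dedup vs).Nodup := by
  exact PySem.Set.nodup_ofList vs

theorem pvPbv_items (vs : List String) :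
    ((PySem.List.enumerate vs).foldl
      (fun d pv => d.modify pv.2 [] (· ++ [pv.1])) PySem.Dict.empty).items
      = (PySem.List.dedup vs).map (fun vid => (vid, pvP vs vid)) := by
  have hkeys : ((PySem.List.enumerate vs).foldl
      (fun d pv => d.modify pv.2 [] (· ++ [pv.1])) PySem.Dict.empty).keys
      = PySem.List.dedup vs := by
    rw [pvKeys_modify_key (fun pv : Int × String => pv.2) (fun pv => (· ++ [pv.1]))]
    rw [PySem.Dict.keys_empty, pvEnum_snd]
    rfl
  have hnodup : ((PySem.List.enumerate vs).foldl
      (fun d pv => d.modify pv.2 [] (· ++ [pv.1])) PySem.Dict.empty).keys.Nodup := by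
    rw [hkeys]; exact pvDedup_nodup vs
  rw [PySem.Dict.items_eq_map_keys _ hnodup [], hkeys]
  exact List.map_congr_left (fun vid _ => by rw [pvPbv_getD])

theorem pvAlt_eq (vs qs : List String) :
    get_gt_old_alt vs qs = (vs.map (pvQ qs), pvLB vs qs) := by
  simp only [get_gt_old_alt]
  simp only [pvQbp_getD]
  rw [pvPbv_items]
  simp only [List.foldl_map]
  rw [pvItems_nested_insert (fun vid => pvQ qs vid) (fun vid => pvP vs vid)
        (fun vid => pvQ_nodup qs vid) (fun a b i ha hb => pvQ_disjoint qs ha hb)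
        (PySem.List.dedup vs) PySem.Dict.empty (pvDedup_nodup vs)
        (fun a _ i _ => PySem.Dict.contains_empty i)]
  rfl

-- A's second phase: getD and keys of the nested modify fold
theorem pvA_t2v_getD (qs : List String) :
    ∀ (l : List (Int × String)) (d : PySem.Dict Int (List Int)) (c : Int),
    (l.foldl (fun d pv => (pvQ qs pv.2).foldl (fun d t_gt => d.modify t_gt [] (· ++ [pv.1])) d) d).getD c []
      = d.getD c [] ++ (l.filter (fun pv => decide (c ∈ pvQ qs pv.2))).map (fun pv => pv.1) := by
  intro l
  induction l with
  | nil => intro d c; simp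
  | cons pv t ih =>
    intro d c
    rw [List.foldl_cons, ih, pvGetD_modify_id, List.filter_cons]
    by_cases hc : c ∈ pvQ qs pv.2
    · rw [List.filter_beq, List.count_eq_one_of_mem (pvQ_nodup qs pv.2) hc]
      simp [hc, List.append_assoc]
    · have hnil : (pvQ qs pv.2).filter (fun i => i == c) = [] := by
        refine List.filter_eq_nil_iff.2 (fun i hi => ?_)
        simp only [Bool.not_eq_true, beq_eq_false_iff_ne, ne_eq]
        intro e
        exact hc (e ▸ hi)
      simp [hnil, hc]

theorem pvA_t2v_keys (qs : List String) :
    ∀ (l : List (Int × String)) (d : PySem.Dict Int (List Int)),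
    (l.foldl (fun d pv => (pvQ qs pv.2).foldl (fun d t_gt => d.modify t_gt [] (· ++ [pv.1])) d) d).keys
      = PySem.Set.update d.keys (l.flatMap (fun pv => pvQ qs pv.2)) := by
  intro l
  induction l with
  | nil => intro d; rfl
  | cons pv t ih =>
    intro d
    rw [List.foldl_cons, ih, pvKeys_modify_id, List.flatMap_cons, pvUpdate_append]

theorem pvA_eq (vs qs : List String) :
    get_gt_old vs qs = (vs.map (pvQ qs), pvLB vs qs) := by
  simp only [get_gt_old]
  rw [pvA_v2t, pvEnum_map]
  simp only [List.foldl_map]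
  simp only [pvSetdefault_modify]
  have hflat : (PySem.List.enumerate vs).flatMap (fun pv => pvQ qs pv.2) = vs.flatMap (pvQ qs) := by
    conv_rhs => rw [← pvEnum_snd vs 0]
    rw [List.flatMap_map]
  have hkeys : ((PySem.List.enumerate vs).foldl
      (fun d pv => (pvQ qs pv.2).foldl (fun d t_gt => d.modify t_gt [] (· ++ [pv.1])) d)
      PySem.Dict.empty).keys = (PySem.List.dedup vs).flatMap (pvQ qs) := by
    rw [pvA_t2v_keys, PySem.Dict.keys_empty, hflat]
    have h := pvUpdate_flatMap (pvQ qs) (pvQ_nodup qs)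
        (fun v w i hv hw => pvQ_disjoint qs hv hw) vs [] List.nodup_nil
    simpa [PySem.List.dedup, PySem.Set.ofList] using h
  have hnodupk : ((PySem.List.enumerate vs).foldl
      (fun d pv => (pvQ qs pv.2).foldl (fun d t_gt => d.modify t_gt [] (· ++ [pv.1])) d)
      PySem.Dict.empty).keys.Nodup := by
    rw [hkeys]
    exact pvNodup_flatMap (pvQ qs) (pvQ_nodup qs)
      (fun v w i hv hw => pvQ_disjoint qs hv hw) _ (pvDedup_nodup vs)
  have hgetD : ∀ (vid : String) (c : Int), c ∈ pvQ qs vid →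
      ((PySem.List.enumerate vs).foldl
        (fun d pv => (pvQ qs pv.2).foldl (fun d t_gt => d.modify t_gt [] (· ++ [pv.1])) d)
        PySem.Dict.empty).getD c [] = pvP vs vid := by
    intro vid c hc
    rw [pvA_t2v_getD, PySem.Dict.getD_empty]
    have hfc : ∀ pv ∈ PySem.List.enumerate vs,
        (decide (c ∈ pvQ qs pv.2)) = (pv.2 == vid) := by
      intro pv _
      by_cases h2 : pv.2 = vid
      · rw [show (pv.2 == vid) = true by simp [h2], decide_eq_true_eq, h2]
        exact hc
      · rw [show (pv.2 == vid) = false by simp [h2], decide_eq_false_iff_not]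
        intro hmem
        exact h2 (pvQ_disjoint qs hmem hc)
    rw [List.filter_congr hfc]
    simp [pvP]
  rw [PySem.Dict.items_eq_map_keys _ hnodupk [], hkeys, List.map_flatMap]
  have hmap : ∀ vid : String,
      (pvQ qs vid).map (fun c => (c, ((PySem.List.enumerate vs).foldl
        (fun d pv => (pvQ qs pv.2).foldl (fun d t_gt => d.modify t_gt [] (· ++ [pv.1])) d)
        PySem.Dict.empty).getD c []))
      = (pvQ qs vid).map (fun c => (c, pvP vs vid)) :=
    fun vid => List.map_congr_left (fun c hc => by rw [hgetD vid c hc])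
  simp only [hmap]
  rfl

-- ===== VERDICT (by name: the statement is the Claim_ definition above) =====
theorem get_gt_old_spec : Claim_equal_get_gt_old := by
  intro vs qs _
  unfold Spec_get_gt_old
  rw [pvA_eq, pvAlt_eq]
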